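-- pv_equiv track=rewrite | github.com/JulianMullins/python_class | session09/word.py | is_abecedarian
-- ===== SOURCE A (Python) =====
-- def is_abecedarian(word):
--     word = word.lower()
--     start = ord(word[0])
--
--     for letter in word:
--         if(ord(letter) >= start):
--             start = ord(letter)
--         else:
--             return False
--     return True
-- ===== SOURCE B (Python) =====
-- def is_abecedarian(word):
--     w = word.lower()
--     return list(w) == sorted(w)
-- ===== Notes on version B (the rewrite author's own statement) =====
-- stated objective: idiomatic
-- what changed: Replaces the running-maximum scanning loop by lowering the word and comparing its character list with its sorted version (sort-then-compare).
-- crash fix: On the empty string A raises IndexError (it indexes word[0]); B returns True (the empty word is vacuously in order). — e.g. on is_abecedarian(""): A raises IndexError, B returns true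
import Mathlib
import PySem

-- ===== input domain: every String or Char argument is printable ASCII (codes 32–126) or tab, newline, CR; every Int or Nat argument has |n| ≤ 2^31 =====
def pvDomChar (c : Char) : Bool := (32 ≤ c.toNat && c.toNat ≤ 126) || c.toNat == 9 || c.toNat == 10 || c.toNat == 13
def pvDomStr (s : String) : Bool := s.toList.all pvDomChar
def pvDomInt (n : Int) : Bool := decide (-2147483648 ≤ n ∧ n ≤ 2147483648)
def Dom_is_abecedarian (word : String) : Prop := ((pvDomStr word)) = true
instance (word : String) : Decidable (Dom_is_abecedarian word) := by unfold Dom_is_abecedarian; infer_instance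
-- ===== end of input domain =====

-- B lowers the word and compares it with its sorted self instead of A's running-maximum scan (idiomatic, not faster).

-- ===== PORT A =====
-- the for-loop with running maximum `start`; returns false at the first decrease
def isAbecLoop : List Char → Nat → Bool
  | [], _ => true
  | l :: rest, start => if start ≤ l.toNat then isAbecLoop rest l.toNat else false

def is_abecedarian (word : String) : Bool :=
  let w := (PySem.Str.lower word).toList
  match w with
  | [] => false   -- word[0] raises IndexError in Python; excluded by Pre_
  | c :: _ => isAbecLoop w c.toNat

-- ===== PORT B =====
def is_abecedarian_alt (word : String) : Bool :=
  let w := (PySem.Str.lower word).toList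
  w == PySem.List.sorted w (fun x => x) false

-- ===== PRECONDITION & SPEC =====
-- Pre_ excludes only the empty string, on which A raises IndexError at word[0].
def Pre_is_abecedarian (word : String) : Prop := word ≠ ""
instance (word : String) : Decidable (Pre_is_abecedarian word) := by unfold Pre_is_abecedarian; infer_instance
def pvWitness_is_abecedarian : String := "abc"

-- On the empty string A raises IndexError (it indexes word[0]); B returns True (the empty word is vacuously in order).
def Raises_is_abecedarian (word : String) : Prop := word = ""
instance (word : String) : Decidable (Raises_is_abecedarian word) := by unfold Raises_is_abecedarian; infer_instance
def pvRaiseWitness_is_abecedarian : String := ""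
def pvRaiseWitnessOut_is_abecedarian : Bool := true

def Spec_is_abecedarian (word : String) (out : Bool) : Prop := out = is_abecedarian_alt word
instance (word : String) (out : Bool) : Decidable (Spec_is_abecedarian word out) := by unfold Spec_is_abecedarian; infer_instance

-- ===== CLAIM (what is proved, stated in full; the proofs are below) =====
def Claim_equal_is_abecedarian : Prop := ∀ (word : String), Dom_is_abecedarian word → Pre_is_abecedarian word → Spec_is_abecedarian word (is_abecedarian word)
def Claim_raises_is_abecedarian : Prop := (∀ (word : String), Dom_is_abecedarian word → Raises_is_abecedarian word → ¬ Pre_is_abecedarian word) ∧ (Dom_is_abecedarian (pvRaiseWitness_is_abecedarian) ∧ Raises_is_abecedarian (pvRaiseWitness_is_abecedarian) ∧ is_abecedarian_alt (pvRaiseWitness_is_abecedarian) = pvRaiseWitnessOut_is_abecedarian)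

-- ===== LEMMAS AND PROOFS =====

-- A's loop with running maximum c.toNat returns true exactly when c :: xs is nondecreasing.
theorem char_le_iff (c x : Char) : c ≤ x ↔ c.toNat ≤ x.toNat := by
  rw [Char.le_def, UInt32.le_iff_toNat_le]; exact Iff.rfl

theorem isAbecLoop_eq_pairwise (xs : List Char) (c : Char) :
    isAbecLoop xs c.toNat = decide (List.Pairwise (· ≤ ·) (c :: xs)) := by
  induction xs generalizing c with
  | nil => simp [isAbecLoop]
  | cons x rest ih =>
    simp only [isAbecLoop]
    by_cases h : c.toNat ≤ x.toNat
    · have hc : c ≤ x := (char_le_iff c x).mpr h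
      rw [if_pos h, ih]
      by_cases hp : List.Pairwise (· ≤ ·) (x :: rest)
      · have : List.Pairwise (· ≤ ·) (c :: x :: rest) := by
          refine List.Pairwise.cons ?_ hp
          intro y hy
          cases hy with
          | head => exact hc
          | tail _ hy => exact le_trans hc ((List.pairwise_cons.mp hp).1 y hy)
        simp [hp, this]
      · have : ¬ List.Pairwise (· ≤ ·) (c :: x :: rest) := fun hcc => hp hcc.tail
        simp [hp, this]
    · have hc : ¬ c ≤ x := fun hcc => h ((char_le_iff c x).mp hcc)
      have : ¬ List.Pairwise (· ≤ ·) (c :: x :: rest) := by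
        intro hcc
        exact hc ((List.pairwise_cons.mp hcc).1 x (by simp))
      simp [h, this]

theorem self_eq_sorted_iff (w : List Char) :
    (w == PySem.List.sorted w (fun x => x) false) = decide (List.Pairwise (· ≤ ·) w) := by
  by_cases h : List.Pairwise (· ≤ ·) w
  · have := PySem.List.sorted_eq_self_of_pairwise (xs := w) (key := fun x => x) h
    simp [this, h]
  · simp only [h, decide_false, beq_eq_false_iff_ne, ne_eq]
    intro heq
    exact h (by simpa using heq ▸ PySem.List.sorted_pairwise (xs := w) (key := fun x => x))

-- ===== VERDICT (by name: the statement is the Claim_ definition above) =====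
theorem is_abecedarian_spec : Claim_equal_is_abecedarian := by
  intro word _ hpre
  unfold Spec_is_abecedarian is_abecedarian is_abecedarian_alt
  cases hw : (PySem.Str.lower word).toList with
  | nil =>
    exfalso
    apply hpre
    have hl : PySem.Chars.lower word.toList = [] := by
      rw [← PySem.Str.toList_lower, hw]
    have : word.toList = [] := by
      cases hx : word.toList with
      | nil => rfl
      | cons a l => rw [hx] at hl; simp [PySem.Chars.lower] at hl
    exact String.toList_eq_nil_iff.mp this
  | cons c rest =>
    simp only [hw]
    simp only [isAbecLoop, if_pos (le_refl c.toNat)]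
    rw [isAbecLoop_eq_pairwise, self_eq_sorted_iff]

@[simp] theorem is_abecedarian_raises : Claim_raises_is_abecedarian := by
  unfold Claim_raises_is_abecedarian
  exact ⟨fun w _ hr hp => hp hr, by decide⟩
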